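-- pv_equiv track=rewrite | github.com/RafBD/metodo-transporte | ficticio.py | esquina_noroeste
-- ===== SOURCE A (Python) =====
-- def esquina_noroeste(derecha, abajo, costo):
--
--   # Verificar si la oferta y la demanda son iguales
--   if sum(derecha) != sum(abajo):
--     # Si la oferta es mayor que la demanda, agregar una demanda ficticia
--     if sum(derecha) > sum(abajo):
--       abajo.append(sum(derecha) - sum(abajo))
--       for i in range(len(costo)):
--         costo[i].append(0)  # Agregar el costo ficticio a todas las filas
--     # Si la demanda es mayor que la oferta, agregar una oferta ficticia
--     else:
--       derecha.append(sum(abajo) - sum(derecha))  # Aquí está la corrección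
--
--   # Inicializar la solución con ceros
--   solucion = [[0 for j in range(len(abajo))] for i in range(len(derecha))]
--   # Iniciar en la celda de la esquina noroeste
--   i = 0
--   j = 0
--
--   # Iterar hasta asignar todas las unidades posibles
--   while i < len(derecha) and j < len(abajo):
--
--     # Asignar la cantidad mínima entre total derecha y total abajo disponibles
--     asignacion = min(derecha[i], abajo[j])
--     solucion[i][j] = asignacion
--     # Actualizar total derecha y total abajo restantes
--     derecha[i] -= asignacion
--     abajo[j] -= asignacion
--
--     # Eliminar la fila o la columna que se haya agotado
--     if derecha[i] == 0:
--       i += 1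
--     elif abajo[j] == 0:
--       j += 1
--
--   # Retornar la solución y el costo total
--   costoTotal = sum(costo[i][j] * solucion[i][j] for i in range(len(derecha)) for j in range(len(abajo)))
--   return solucion, costoTotal
-- ===== SOURCE B (Python) =====
-- def _nw(d, a, c):
--     # Structural recursion on the supply/demand lists: returns the allocation
--     # matrix for the remaining subproblem and its cost, built by prepending
--     # rows/columns; no index counters, no preallocated matrix, no mutation.
--     if not d or not a:
--         return [[0] * len(a) for _ in d], 0
--     q = min(d[0], a[0])
--     if d[0] - q == 0:
--         rest, t = _nw(d[1:], [a[0] - q] + a[1:], c[1:])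
--         return [[q] + [0] * (len(a) - 1)] + rest, c[0][0] * q + t
--     else:
--         rest, t = _nw([d[0] - q] + d[1:], a[1:], [row[1:] for row in c])
--         return [[q] + rest[0]] + [[0] + row for row in rest[1:]], c[0][0] * q + t
--
--
-- def esquina_noroeste(derecha, abajo, costo):
--     # Return-value equivalent to A; unlike A, does not mutate its arguments.
--     sd, sa = sum(derecha), sum(abajo)
--     if sd > sa:
--         d = list(derecha)
--         a = abajo + [sd - sa]
--         c = [row + [0] for row in costo]
--     elif sa > sd:
--         d = derecha + [sa - sd]
--         a = list(abajo)
--         c = costo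
--     else:
--         d, a, c = list(derecha), list(abajo), costo
--     sol, total = _nw(d, a, c)
--     return sol, total
-- ===== Notes on version B (the rewrite author's own statement) =====
-- stated objective: alternative
-- what changed: B replaces A's preallocated zero matrix, index-mutating while-loop and final full-matrix cost rescan by a pure structural recursion on the supply/demand lists that builds the solution by prepending a finished row or a finished column and accumulates the total cost inline; B also leaves its arguments unmutated.
import Mathlib
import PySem

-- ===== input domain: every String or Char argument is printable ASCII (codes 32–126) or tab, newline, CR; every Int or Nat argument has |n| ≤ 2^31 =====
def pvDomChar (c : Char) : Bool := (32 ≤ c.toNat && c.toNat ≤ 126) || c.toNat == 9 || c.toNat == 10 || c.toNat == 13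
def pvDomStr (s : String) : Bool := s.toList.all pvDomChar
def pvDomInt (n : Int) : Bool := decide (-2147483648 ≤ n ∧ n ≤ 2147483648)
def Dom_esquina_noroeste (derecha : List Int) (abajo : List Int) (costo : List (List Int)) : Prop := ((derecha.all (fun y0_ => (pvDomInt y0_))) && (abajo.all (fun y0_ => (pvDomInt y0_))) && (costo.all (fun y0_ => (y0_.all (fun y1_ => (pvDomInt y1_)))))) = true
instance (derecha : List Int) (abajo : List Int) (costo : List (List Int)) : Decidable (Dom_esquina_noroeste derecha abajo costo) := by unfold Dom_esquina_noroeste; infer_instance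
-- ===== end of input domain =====

-- ===== PORT A =====
-- B rebuilds the solution by structural recursion on the supply/demand lists
-- (prepending rows/columns, cost accumulated inline) instead of A's preallocated
-- matrix, index-mutating while-loop and full-matrix cost rescan ('alternative').
-- A mutates its arguments in place (balancing appends, in-loop subtraction); B does not:
-- the equivalence proved here is about the RETURN value only.

-- the northwest-corner while-loop of A: mutates derecha/abajo/solucion, returns solucion
def nwLoopA (d a : List Int) (sol : List (List Int)) (i j : Nat) : List (List Int) :=
  if h : i < d.length ∧ j < a.length then
    let di := d.getD i 0
    let aj := a.getD j 0
    let q := min di aj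
    let sol' := sol.set i ((sol.getD i []).set j q)
    let d' := d.set i (di - q)
    let a' := a.set j (aj - q)
    if di - q = 0 then nwLoopA d' a' sol' (i + 1) j
    else if aj - q = 0 then nwLoopA d' a' sol' i (j + 1)
    else nwLoopA d' a' sol' i j
  else sol
termination_by (d.length - i) + (a.length - j)
decreasing_by
  · simp only [List.length_set]; omega
  · simp only [List.length_set]; omega
  · exfalso; rcases min_choice (d.getD i 0) (a.getD j 0) with hm | hm <;> omega

def esquina_noroeste (derecha : List Int) (abajo : List Int) (costo : List (List Int)) : List (List Int) × Int :=
  -- balancing block (in Python this mutates the arguments; ported on local values)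
  let p :=
    if derecha.sum ≠ abajo.sum then
      if derecha.sum > abajo.sum then
        (derecha, abajo ++ [derecha.sum - abajo.sum], costo.map (fun row => row ++ [(0 : Int)]))
      else (derecha ++ [abajo.sum - derecha.sum], abajo, costo)
    else (derecha, abajo, costo)
  let d := p.1
  let a := p.2.1
  let c := p.2.2
  -- solucion = [[0]*len(abajo) for i in range(len(derecha))]
  let sol0 := (List.range d.length).map (fun _ => (List.range a.length).map (fun _ => (0 : Int)))
  let sol := nwLoopA d a sol0 0 0
  -- costoTotal = sum(costo[i][j]*solucion[i][j] for i in range(len(derecha)) for j in range(len(abajo)))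
  let total :=
    ((List.range d.length).flatMap (fun i =>
      (List.range a.length).map (fun j => (c.getD i []).getD j 0 * (sol.getD i []).getD j 0))).sum
  (sol, total)

-- ===== PORT B =====
-- B's _nw: structural recursion on the lists; returns (matrix, cost) of the
-- remaining subproblem, built by prepending a finished row / a finished column.
def nwRec (d a : List Int) (c : List (List Int)) : List (List Int) × Int :=
  match d, a with
  | d0 :: dt, a0 :: at_ =>
    let q := min d0 a0
    if d0 - q = 0 then
      -- rest, t = _nw(d[1:], [a[0]-q] + a[1:], c[1:])
      let r := nwRec dt ((a0 - q) :: at_) (c.drop 1)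
      (((q :: List.replicate at_.length (0 : Int)) :: r.1),
        (c.getD 0 []).getD 0 0 * q + r.2)
    else
      -- rest, t = _nw([d[0]-q] + d[1:], a[1:], [row[1:] for row in c])
      let r := nwRec ((d0 - q) :: dt) at_ (c.map (fun row => row.drop 1))
      (((q :: r.1.headD []) :: (r.1.drop 1).map (fun row => (0 : Int) :: row)),
        (c.getD 0 []).getD 0 0 * q + r.2)
  | d, a => (d.map (fun _ => List.replicate a.length (0 : Int)), 0)
termination_by d.length + a.length
decreasing_by
  all_goals simp only [List.length_cons]; omega

def esquina_noroeste_alt (derecha : List Int) (abajo : List Int) (costo : List (List Int)) : List (List Int) × Int :=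
  let p :=
    if derecha.sum > abajo.sum then
      (derecha, abajo ++ [derecha.sum - abajo.sum], costo.map (fun row => row ++ [(0 : Int)]))
    else if abajo.sum > derecha.sum then
      (derecha ++ [abajo.sum - derecha.sum], abajo, costo)
    else (derecha, abajo, costo)
  nwRec p.1 p.2.1 p.2.2

-- ===== PRECONDITION & SPEC =====
-- Pre_ excludes exactly the inputs on which A RAISES IndexError: after balancing, the final
-- full-matrix cost rescan reads costo[i][j] for every cell of the (nonempty) balanced grid,
-- so costo must have at least as many rows as the grid and those rows must reach every column.
def Pre_esquina_noroeste (derecha : List Int) (abajo : List Int) (costo : List (List Int)) : Prop :=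
  derecha.length + (if derecha.sum < abajo.sum then 1 else 0) = 0 ∨
  abajo.length + (if abajo.sum < derecha.sum then 1 else 0) = 0 ∨
  (derecha.length + (if derecha.sum < abajo.sum then 1 else 0) ≤ costo.length ∧
   ∀ row ∈ costo.take (derecha.length + (if derecha.sum < abajo.sum then 1 else 0)),
     abajo.length ≤ row.length)
instance (derecha : List Int) (abajo : List Int) (costo : List (List Int)) : Decidable (Pre_esquina_noroeste derecha abajo costo) := by unfold Pre_esquina_noroeste; infer_instance

def pvWitness_esquina_noroeste : List Int × List Int × List (List Int) :=
  ([3, 2], [1, 4], [[1, 2], [3, 4]])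

def Spec_esquina_noroeste (derecha : List Int) (abajo : List Int) (costo : List (List Int)) (out : List (List Int) × Int) : Prop := out = esquina_noroeste_alt derecha abajo costo
instance (derecha : List Int) (abajo : List Int) (costo : List (List Int)) (out : List (List Int) × Int) : Decidable (Spec_esquina_noroeste derecha abajo costo out) := by unfold Spec_esquina_noroeste; infer_instance

-- ===== CLAIM (what is proved, stated in full; the proofs are below) =====
def Claim_equal_esquina_noroeste : Prop := ∀ (derecha : List Int) (abajo : List Int) (costo : List (List Int)), Dom_esquina_noroeste derecha abajo costo → Pre_esquina_noroeste derecha abajo costo → Spec_esquina_noroeste derecha abajo costo (esquina_noroeste derecha abajo costo)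

-- ===== LEMMAS AND PROOFS =====

-- proof-side helpers: the staircase path of assigned cells, and matrix cell access
def nwPath (d a : List Int) (i j : Nat) : List ((Nat × Nat) × Int) :=
  if h : i < d.length ∧ j < a.length then
    ((i, j), min (d.getD i 0) (a.getD j 0)) ::
      (if d.getD i 0 - min (d.getD i 0) (a.getD j 0) = 0 then
        nwPath (d.set i (d.getD i 0 - min (d.getD i 0) (a.getD j 0)))
               (a.set j (a.getD j 0 - min (d.getD i 0) (a.getD j 0))) (i + 1) j
       else
        nwPath (d.set i (d.getD i 0 - min (d.getD i 0) (a.getD j 0)))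
               (a.set j (a.getD j 0 - min (d.getD i 0) (a.getD j 0))) i (j + 1))
  else []
termination_by (d.length - i) + (a.length - j)
decreasing_by
  · simp only [List.length_set]; omega
  · simp only [List.length_set]; omega

-- first-match lookup in a sparse cell list, 0 if absent
def bLookup (celdas : List ((Nat × Nat) × Int)) (key : Nat × Nat) : Int :=
  match celdas with
  | [] => 0
  | (k, v) :: t => if k = key then v else bLookup t key

def pvWrite (s : List (List Int)) (t : (Nat × Nat) × Int) : List (List Int) :=
  s.set t.1.1 ((s.getD t.1.1 []).set t.1.2 t.2)

def getCell (M : List (List Int)) (r s : Nat) : Int := (M.getD r []).getD s 0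

-- A's loop = the path's writes folded over the starting matrix
theorem pv_loop_eq : ∀ (d a : List Int) (sol : List (List Int)) (i j : Nat),
    nwLoopA d a sol i j = (nwPath d a i j).foldl pvWrite sol := by
  intro d a sol i j
  induction d, a, sol, i, j using nwLoopA.induct with
  | case1 d a sol i j h di aj q sol' d' a' hd ih =>
    simp only [di, aj, q] at hd
    simp only [di, aj, q, sol', d', a'] at ih
    rw [nwLoopA, nwPath, dif_pos h, dif_pos h, if_pos hd, if_pos hd, ih, List.foldl_cons]
    rfl
  | case2 d a sol i j h di aj q sol' d' a' hd ha ih =>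
    simp only [di, aj, q] at hd ha
    simp only [di, aj, q, sol', d', a'] at ih
    rw [nwLoopA, nwPath, dif_pos h, dif_pos h, if_neg hd, if_neg hd, if_pos ha, ih, List.foldl_cons]
    rfl
  | case3 d a sol i j h di aj q sol' d' a' hd ha ih =>
    exfalso
    simp only [di, aj, q] at hd ha
    rcases min_choice (d.getD i 0) (a.getD j 0) with hm | hm <;> omega
  | case4 d a sol i j h =>
    rw [nwLoopA, nwPath]
    simp [h]

-- every path cell lies in the (current) grid window
theorem pv_path_bounds : ∀ (d a : List Int) (i j : Nat) (t : (Nat × Nat) × Int),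
    t ∈ nwPath d a i j → i ≤ t.1.1 ∧ t.1.1 < d.length ∧ j ≤ t.1.2 ∧ t.1.2 < a.length := by
  intro d a i j
  induction d, a, i, j using nwPath.induct with
  | case1 d a i j h ih1 ih2 =>
    intro t ht
    rw [nwPath, dif_pos h] at ht
    rcases List.mem_cons.mp ht with rfl | ht
    · exact ⟨le_refl _, h.1, le_refl _, h.2⟩
    · by_cases hd : d.getD i 0 - min (d.getD i 0) (a.getD j 0) = 0
      · rw [if_pos hd] at ht
        have := ih1 t ht
        simp only [List.length_set] at this
        exact ⟨by omega, this.2.1, by omega, this.2.2.2⟩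
      · rw [if_neg hd] at ht
        have := ih2 t ht
        simp only [List.length_set] at this
        exact ⟨by omega, this.2.1, by omega, this.2.2.2⟩
  | case2 d a i j h =>
    intro t ht
    rw [nwPath] at ht
    simp [h] at ht

-- path cells carry pairwise distinct keys
theorem pv_path_pairwise : ∀ (d a : List Int) (i j : Nat),
    (nwPath d a i j).Pairwise (fun u v => u.1 ≠ v.1) := by
  intro d a i j
  induction d, a, i, j using nwPath.induct with
  | case1 d a i j h ih1 ih2 =>
    rw [nwPath, dif_pos h]
    by_cases hd : d.getD i 0 - min (d.getD i 0) (a.getD j 0) = 0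
    · rw [if_pos hd]
      refine List.Pairwise.cons ?_ ih1
      intro v hv hk
      have hb := pv_path_bounds _ _ _ _ v hv
      have : i = v.1.1 ∧ j = v.1.2 := ⟨congrArg Prod.fst hk, congrArg Prod.snd hk⟩
      omega
    · rw [if_neg hd]
      refine List.Pairwise.cons ?_ ih2
      intro v hv hk
      have hb := pv_path_bounds _ _ _ _ v hv
      have : i = v.1.1 ∧ j = v.1.2 := ⟨congrArg Prod.fst hk, congrArg Prod.snd hk⟩
      omega
  | case2 d a i j h =>
    rw [nwPath]; simp [h]

theorem pv_bLookup_of_not_mem (l : List ((Nat × Nat) × Int)) (key : Nat × Nat)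
    (h : ∀ t ∈ l, t.1 ≠ key) : bLookup l key = 0 := by
  induction l with
  | nil => rfl
  | cons t l ih =>
    rw [bLookup]
    rw [if_neg (h t (List.mem_cons_self ..))]
    exact ih (fun u hu => h u (List.mem_cons_of_mem _ hu))

-- a write leaves every other cell unchanged
theorem pv_write_other (M : List (List Int)) (r0 s0 : Nat) (q : Int) (r s : Nat)
    (h : ¬(r0 = r ∧ s0 = s)) : getCell (pvWrite M ((r0, s0), q)) r s = getCell M r s := by
  by_cases hr : r0 = r
  · subst hr
    have hs : s0 ≠ s := fun hs => h ⟨rfl, hs⟩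
    by_cases hlen : r0 < M.length
    · simp only [getCell, pvWrite, List.getD, List.getElem?_set_self hlen, Option.getD_some,
        List.getElem?_set_ne hs]
    · unfold getCell pvWrite
      rw [List.set_eq_of_length_le (Nat.le_of_not_lt hlen)]
  · simp only [getCell, pvWrite, List.getD, List.getElem?_set_ne hr]

-- a write sets its own cell (when in range)
theorem pv_write_self (M : List (List Int)) (r0 s0 : Nat) (q : Int)
    (h1 : r0 < M.length) (h2 : s0 < (M.getD r0 []).length) :
    getCell (pvWrite M ((r0, s0), q)) r0 s0 = q := by
  simp only [getCell, pvWrite, List.getD]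
  rw [List.getElem?_set_self h1, Option.getD_some,
    List.getElem?_set_self (by simpa [List.getD] using h2), Option.getD_some]

-- folding writes preserves row lengths
theorem pv_foldl_rows (nd na : Nat) : ∀ (l : List ((Nat × Nat) × Int)) (M : List (List Int)),
    M.length = nd → (∀ row ∈ M, row.length = na) → (∀ t ∈ l, t.1.1 < nd ∧ t.1.2 < na) →
    ∀ row ∈ l.foldl pvWrite M, row.length = na := by
  intro l
  induction l with
  | nil => intro M _ h _; exact h
  | cons t l ihl =>
    intro M hlen hrow hrange
    obtain ⟨⟨r0, s0⟩, q⟩ := t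
    have ht := hrange _ (List.mem_cons_self ..)
    simp only at ht
    have hrowlen : (M.getD r0 []).length = na := by
      have hx : M.getD r0 [] = M[r0]'(by omega) := by
        simp [List.getD, List.getElem?_eq_getElem (show r0 < M.length by omega)]
      rw [hx]; exact hrow _ (List.getElem_mem _)
    rw [List.foldl_cons]
    refine ihl (pvWrite M ((r0, s0), q)) (by simp [pvWrite, hlen]) ?_
      (fun u hu => hrange u (List.mem_cons_of_mem _ hu))
    intro row hmem
    rcases List.mem_or_eq_of_mem_set hmem with hm | rfl
    · exact hrow _ hm
    · simp only [List.length_set]; exact hrowlen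

-- folding pairwise-distinct in-range writes: each cell becomes its looked-up value
theorem pv_cell_foldl (nd na : Nat) : ∀ (l : List ((Nat × Nat) × Int)) (M : List (List Int)),
    M.length = nd → (∀ row ∈ M, row.length = na) →
    (∀ t ∈ l, t.1.1 < nd ∧ t.1.2 < na) → l.Pairwise (fun u v => u.1 ≠ v.1) →
    ∀ r s : Nat,
      getCell (l.foldl pvWrite M) r s =
        if (r, s) ∈ l.map (·.1) then bLookup l (r, s) else getCell M r s := by
  intro l
  induction l with
  | nil => intro M _ _ _ _ r s; simp
  | cons t l ih =>
    intro M hlen hrow hrange hpw r s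
    obtain ⟨⟨r0, s0⟩, q⟩ := t
    have ht := hrange _ (List.mem_cons_self ..)
    simp only at ht
    have hrowlen : (M.getD r0 []).length = na := by
      have hx : M.getD r0 [] = M[r0]'(by omega) := by
        simp [List.getD, List.getElem?_eq_getElem (show r0 < M.length by omega)]
      rw [hx]; exact hrow _ (List.getElem_mem _)
    have hlen' : (pvWrite M ((r0, s0), q)).length = nd := by simp [pvWrite, hlen]
    have hrow' : ∀ row ∈ pvWrite M ((r0, s0), q), row.length = na := by
      intro row hmem
      rcases List.mem_or_eq_of_mem_set hmem with hm | rfl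
      · exact hrow _ hm
      · simp only [List.length_set]; exact hrowlen
    have hrange' : ∀ u ∈ l, u.1.1 < nd ∧ u.1.2 < na :=
      fun u hu => hrange u (List.mem_cons_of_mem _ hu)
    have hpw' : l.Pairwise (fun u v => u.1 ≠ v.1) := hpw.of_cons
    have hhead : ∀ v ∈ l, (r0, s0) ≠ v.1 := fun v hv => List.rel_of_pairwise_cons hpw hv
    rw [List.foldl_cons, ih (pvWrite M ((r0, s0), q)) hlen' hrow' hrange' hpw' r s]
    by_cases hk : r0 = r ∧ s0 = s
    · obtain ⟨rfl, rfl⟩ := hk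
      have hnot : (r0, s0) ∉ l.map (·.1) := by
        intro hmem
        rcases List.mem_map.mp hmem with ⟨v, hv, hveq⟩
        exact hhead v hv hveq.symm
      rw [if_neg hnot, pv_write_self M r0 s0 q (by omega) (by omega)]
      have hmem : (r0, s0) ∈ ((⟨⟨r0, s0⟩, q⟩ : (Nat × Nat) × Int) :: l).map (·.1) := by simp
      rw [if_pos hmem, bLookup, if_pos rfl]
    · rw [pv_write_other M r0 s0 q r s hk]
      have hne : (r0, s0) ≠ (r, s) := by
        intro hc
        exact hk ⟨congrArg Prod.fst hc, congrArg Prod.snd hc⟩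
      have hiff : ((r, s) ∈ (((r0, s0), q) :: l).map (·.1)) ↔ ((r, s) ∈ l.map (·.1)) := by
        simp only [List.map_cons, List.mem_cons]
        constructor
        · rintro (h | h)
          · exact absurd h.symm hne
          · exact h
        · exact Or.inr
      rw [bLookup, if_neg hne]
      by_cases hmem : (r, s) ∈ l.map (·.1)
      · rw [if_pos (hiff.mpr hmem), if_pos hmem]
      · rw [if_neg (fun hc => hmem (hiff.mp hc)), if_neg hmem]

-- folding writes preserves the length
theorem pv_foldl_length : ∀ (l : List ((Nat × Nat) × Int)) (M : List (List Int)),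
    (l.foldl pvWrite M).length = M.length := by
  intro l
  induction l with
  | nil => intro M; rfl
  | cons t l ih => intro M; rw [List.foldl_cons, ih]; simp [pvWrite]

-- the all-zero matrix reads 0 everywhere
theorem pv_zero_cell (nd na r s : Nat) :
    getCell ((List.range nd).map (fun _ => (List.range na).map (fun _ => (0 : Int)))) r s = 0 := by
  simp only [getCell, List.getD, List.getElem?_map]
  rcases (List.range nd)[r]? with _ | k
  · simp
  · simp only [Option.map_some, Option.getD_some, List.getElem?_map]
    rcases (List.range na)[s]? with _ | m <;> simp

-- shifting the row index past a prepended supply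
theorem pv_path_shift_row (x : Int) : ∀ (d a : List Int) (i j : Nat),
    nwPath (x :: d) a (i + 1) j = (nwPath d a i j).map (fun t => ((t.1.1 + 1, t.1.2), t.2)) := by
  intro d a i j
  induction d, a, i, j using nwPath.induct with
  | case1 d a i j h ih1 ih2 =>
    conv_lhs => rw [nwPath]
    conv_rhs => rw [nwPath]
    rw [dif_pos (by simp; omega : (i + 1 < (x :: d).length ∧ j < a.length)), dif_pos h]
    simp only [List.getD_cons_succ, List.set_cons_succ, List.map_cons]
    by_cases hd : d.getD i 0 - min (d.getD i 0) (a.getD j 0) = 0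
    · rw [if_pos hd, if_pos hd, ih1]
    · rw [if_neg hd, if_neg hd, ih2]
  | case2 d a i j h =>
    conv_lhs => rw [nwPath]
    conv_rhs => rw [nwPath]
    rw [dif_neg (by simp; omega), dif_neg h]
    rfl

-- shifting the column index past a prepended demand
theorem pv_path_shift_col (y : Int) : ∀ (d a : List Int) (i j : Nat),
    nwPath d (y :: a) i (j + 1) = (nwPath d a i j).map (fun t => ((t.1.1, t.1.2 + 1), t.2)) := by
  intro d a i j
  induction d, a, i, j using nwPath.induct with
  | case1 d a i j h ih1 ih2 =>
    conv_lhs => rw [nwPath]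
    conv_rhs => rw [nwPath]
    rw [dif_pos (by simp; omega : (i < d.length ∧ j + 1 < (y :: a).length)), dif_pos h]
    simp only [List.getD_cons_succ, List.set_cons_succ, List.map_cons]
    by_cases hd : d.getD i 0 - min (d.getD i 0) (a.getD j 0) = 0
    · rw [if_pos hd, if_pos hd, ih1]
    · rw [if_neg hd, if_neg hd, ih2]
  | case2 d a i j h =>
    conv_lhs => rw [nwPath]
    conv_rhs => rw [nwPath]
    rw [dif_neg (by simp; omega), dif_neg h]
    rfl

-- lookups through a row shift
theorem pv_bLookup_shift_row (l : List ((Nat × Nat) × Int)) (r s : Nat) :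
    bLookup (l.map (fun t => ((t.1.1 + 1, t.1.2), t.2))) (r, s) =
      if r = 0 then 0 else bLookup l (r - 1, s) := by
  induction l with
  | nil => simp [bLookup]
  | cons t l ih =>
    obtain ⟨⟨p1, p2⟩, v⟩ := t
    simp only [List.map_cons, bLookup]
    rcases eq_or_ne ((p1 + 1, p2) : Nat × Nat) (r, s) with hk | hk
    · have h1 : p1 + 1 = r := congrArg Prod.fst hk
      have h2 : p2 = s := congrArg Prod.snd hk
      have hkey : ((p1, p2) : Nat × Nat) = (r - 1, s) := by rw [Prod.mk.injEq]; omega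
      rw [if_pos hk, if_neg (by omega), if_pos hkey]
    · rw [if_neg hk, ih]
      by_cases hr : r = 0
      · simp [hr]
      · have hne : ((p1, p2) : Nat × Nat) ≠ (r - 1, s) := by
          intro hc
          have h1 : p1 = r - 1 := congrArg Prod.fst hc
          have h2 : p2 = s := congrArg Prod.snd hc
          exact hk (by rw [Prod.mk.injEq]; omega)
        rw [if_neg hr, if_neg hr, if_neg hne]

-- lookups through a column shift
theorem pv_bLookup_shift_col (l : List ((Nat × Nat) × Int)) (r s : Nat) :
    bLookup (l.map (fun t => ((t.1.1, t.1.2 + 1), t.2))) (r, s) =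
      if s = 0 then 0 else bLookup l (r, s - 1) := by
  induction l with
  | nil => simp [bLookup]
  | cons t l ih =>
    obtain ⟨⟨p1, p2⟩, v⟩ := t
    simp only [List.map_cons, bLookup]
    rcases eq_or_ne ((p1, p2 + 1) : Nat × Nat) (r, s) with hk | hk
    · have h1 : p1 = r := congrArg Prod.fst hk
      have h2 : p2 + 1 = s := congrArg Prod.snd hk
      have hkey : ((p1, p2) : Nat × Nat) = (r, s - 1) := by rw [Prod.mk.injEq]; omega
      rw [if_pos hk, if_neg (by omega), if_pos hkey]
    · rw [if_neg hk, ih]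
      by_cases hs : s = 0
      · simp [hs]
      · have hne : ((p1, p2) : Nat × Nat) ≠ (r, s - 1) := by
          intro hc
          have h1 : p1 = r := congrArg Prod.fst hc
          have h2 : p2 = s - 1 := congrArg Prod.snd hc
          exact hk (by rw [Prod.mk.injEq]; omega)
        rw [if_neg hs, if_neg hs, if_neg hne]

-- getD bridges for the sliced cost matrix
theorem pv_getD_drop (c : List (List Int)) (r : Nat) :
    (c.drop 1).getD r [] = c.getD (r + 1) [] := by
  simp [List.getD]

theorem pv_getD_map_drop (c : List (List Int)) (r s : Nat) :
    ((c.map (fun row => row.drop 1)).getD r []).getD s 0 = (c.getD r []).getD (s + 1) 0 := by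
  induction c generalizing r with
  | nil => simp [List.getD]
  | cons row ct ih =>
    cases r with
    | zero => simp [List.getD]
    | succ r => simpa [List.getD] using ih r

-- the grid and total cost read off a sparse path
def pvGrid (nd na : Nat) (p : List ((Nat × Nat) × Int)) : List (List Int) :=
  (List.range nd).map (fun r => (List.range na).map (fun s => bLookup p (r, s)))

def pvCost (c : List (List Int)) (p : List ((Nat × Nat) × Int)) : Int :=
  (p.map (fun t => (c.getD t.1.1 []).getD t.1.2 0 * t.2)).sum

theorem pv_path_nil (d a : List Int) (h : d = [] ∨ a = []) : nwPath d a 0 0 = [] := by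
  rw [nwPath, dif_neg]
  rcases h with rfl | rfl <;> simp

theorem pv_grid_nil (nd na : Nat) :
    pvGrid nd na [] = List.replicate nd (List.replicate na (0 : Int)) := by
  unfold pvGrid
  simp only [bLookup]
  rw [List.map_const', List.map_const']
  simp

theorem pv_grid_row_step (n m : Nat) (q : Int) (l : List ((Nat × Nat) × Int)) :
    pvGrid (n + 1) (m + 1) (((0, 0), q) :: l.map (fun t => ((t.1.1 + 1, t.1.2), t.2))) =
      (q :: List.replicate m 0) :: pvGrid n (m + 1) l := by
  unfold pvGrid
  simp only [bLookup, pv_bLookup_shift_row, List.range_succ_eq_map, List.map_cons, List.map_map]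
  refine List.cons_eq_cons.mpr ⟨?_, ?_⟩
  · refine List.cons_eq_cons.mpr ⟨by simp, ?_⟩
    trans ((List.range m).map (fun _ => (0 : Int)))
    · exact List.map_congr_left (fun s _ => by simp [Function.comp])
    · rw [List.map_const']; simp
  · refine List.map_congr_left (fun r _ => ?_)
    simp only [Function.comp]
    refine List.cons_eq_cons.mpr ⟨by simp [Prod.mk.injEq], ?_⟩
    refine List.map_congr_left (fun s _ => ?_)
    simp [Function.comp, Prod.mk.injEq]

theorem pv_grid_col_step (n m : Nat) (q : Int) (l : List ((Nat × Nat) × Int)) :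
    pvGrid (n + 1) (m + 1) (((0, 0), q) :: l.map (fun t => ((t.1.1, t.1.2 + 1), t.2))) =
      (q :: (pvGrid (n + 1) m l).headD []) ::
        ((pvGrid (n + 1) m l).drop 1).map (fun row => (0 : Int) :: row) := by
  unfold pvGrid
  simp only [bLookup, pv_bLookup_shift_col, List.range_succ_eq_map, List.map_cons, List.map_map,
    List.headD_cons, List.drop_one, List.tail_cons]
  refine List.cons_eq_cons.mpr ⟨?_, ?_⟩
  · refine List.cons_eq_cons.mpr ⟨by simp, ?_⟩
    refine List.map_congr_left (fun s _ => ?_)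
    simp [Function.comp, Prod.mk.injEq]
  · refine List.map_congr_left (fun r _ => ?_)
    simp only [Function.comp]
    refine List.cons_eq_cons.mpr ⟨by simp [Prod.mk.injEq], ?_⟩
    refine List.map_congr_left (fun s _ => ?_)
    simp [Function.comp, Prod.mk.injEq]

theorem pv_cost_row_step (c : List (List Int)) (q : Int) (l : List ((Nat × Nat) × Int)) :
    pvCost c (((0, 0), q) :: l.map (fun t => ((t.1.1 + 1, t.1.2), t.2))) =
      (c.getD 0 []).getD 0 0 * q + pvCost (c.drop 1) l := by
  unfold pvCost
  rw [List.map_cons, List.sum_cons, List.map_map]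
  congr 1
  refine congrArg List.sum (List.map_congr_left (fun t _ => ?_))
  show (c.getD (t.1.1 + 1) []).getD t.1.2 0 * t.2 = ((c.drop 1).getD t.1.1 []).getD t.1.2 0 * t.2
  rw [pv_getD_drop]

theorem pv_cost_col_step (c : List (List Int)) (q : Int) (l : List ((Nat × Nat) × Int)) :
    pvCost c (((0, 0), q) :: l.map (fun t => ((t.1.1, t.1.2 + 1), t.2))) =
      (c.getD 0 []).getD 0 0 * q + pvCost (c.map (fun row => row.drop 1)) l := by
  unfold pvCost
  rw [List.map_cons, List.sum_cons, List.map_map]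
  congr 1
  refine congrArg List.sum (List.map_congr_left (fun t _ => ?_))
  show (c.getD t.1.1 []).getD (t.1.2 + 1) 0 * t.2 =
    ((c.map (fun row => row.drop 1)).getD t.1.1 []).getD t.1.2 0 * t.2
  rw [pv_getD_map_drop]

-- B's recursion computed against the staircase path
theorem pv_rec_eq : ∀ (d a : List Int) (c : List (List Int)),
    nwRec d a c = (pvGrid d.length a.length (nwPath d a 0 0), pvCost c (nwPath d a 0 0)) := by
  intro d a c
  induction d, a, c using nwRec.induct with
  | case1 c d0 dt a0 at_ q hd ih =>
    have hq : q = min d0 a0 := rfl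
    rw [hq] at hd ih
    have hpath : nwPath (d0 :: dt) (a0 :: at_) 0 0 =
        ((0, 0), min d0 a0) ::
          (nwPath dt ((a0 - min d0 a0) :: at_) 0 0).map (fun t => ((t.1.1 + 1, t.1.2), t.2)) := by
      conv_lhs => rw [nwPath]
      rw [dif_pos ⟨by simp, by simp⟩]
      simp only [List.getD_cons_zero, List.set_cons_zero]
      rw [if_pos hd, pv_path_shift_row]
    rw [nwRec]
    simp only [List.length_cons]
    rw [if_pos hd, ih, hpath, pv_grid_row_step, pv_cost_row_step]
    simp only [List.length_cons]
  | case2 c d0 dt a0 at_ q hd ih =>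
    have hq : q = min d0 a0 := rfl
    rw [hq] at hd ih
    have hat : List.map (fun x => match x with | ⟨row, _⟩ => List.drop 1 row)
        c.attach = c.map (fun row => row.drop 1) := by
      simp
    rw [hat] at ih
    have hpath : nwPath (d0 :: dt) (a0 :: at_) 0 0 =
        ((0, 0), min d0 a0) ::
          (nwPath ((d0 - min d0 a0) :: dt) at_ 0 0).map (fun t => ((t.1.1, t.1.2 + 1), t.2)) := by
      conv_lhs => rw [nwPath]
      rw [dif_pos ⟨by simp, by simp⟩]
      simp only [List.getD_cons_zero, List.set_cons_zero]
      rw [if_neg hd, pv_path_shift_col]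
    rw [nwRec]
    simp only [List.length_cons]
    rw [if_neg hd, ih, hpath, pv_grid_col_step, pv_cost_col_step]
    simp only [List.length_cons]
  | case3 c d a h =>
    have hnil : d = [] ∨ a = [] := by
      rcases d with _ | ⟨d0, dt⟩
      · exact Or.inl rfl
      rcases a with _ | ⟨a0, at_⟩
      · exact Or.inr rfl
      exact absurd (h d0 dt a0 at_ rfl rfl) (by simp)
    rw [pv_path_nil d a hnil, pv_grid_nil]
    rcases d with _ | ⟨d0, dt⟩
    · simp [nwRec, pvCost]
    rcases a with _ | ⟨a0, at_⟩
    · simp [nwRec, pvCost, List.map_const', List.replicate_succ]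
    simp at hnil

theorem pv_list_sum_finset (g : Nat → Int) (n : Nat) :
    ((List.range n).map g).sum = ∑ i ∈ Finset.range n, g i := by
  rw [Finset.sum_eq_multiset_sum]; rfl

-- grid sum of looked-up values = sum along the list (distinct in-range keys)
theorem pv_grid_sum (nd na : Nat) (f : Nat → Nat → Int) :
    ∀ (l : List ((Nat × Nat) × Int)),
    (∀ t ∈ l, t.1.1 < nd ∧ t.1.2 < na) → l.Pairwise (fun u v => u.1 ≠ v.1) →
    (∑ i ∈ Finset.range nd, ∑ j ∈ Finset.range na, f i j * bLookup l (i, j)) =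
      (l.map (fun t => f t.1.1 t.1.2 * t.2)).sum := by
  intro l
  induction l with
  | nil => intro _ _; simp [pv_bLookup_of_not_mem]
  | cons t l ih =>
    intro hrange hpw
    obtain ⟨⟨r0, s0⟩, q⟩ := t
    have ht := hrange _ (List.mem_cons_self ..)
    simp only at ht
    have hhead : ∀ v ∈ l, ((r0, s0), q).1 ≠ v.1 := fun v hv => List.rel_of_pairwise_cons hpw hv
    have hstep : ∀ i j : Nat, f i j * bLookup (((r0, s0), q) :: l) (i, j) =
        f i j * bLookup l (i, j) + (if i = r0 then (if j = s0 then f r0 s0 * (q - bLookup l (r0, s0)) else 0) else 0) := by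
      intro i j
      rw [bLookup]
      by_cases hi : i = r0
      · subst hi
        by_cases hj : j = s0
        · subst hj
          rw [if_pos rfl, if_pos rfl, if_pos rfl]
          ring
        · rw [if_neg (fun hc => hj (congrArg Prod.snd hc).symm), if_pos rfl, if_neg hj]
          ring
      · rw [if_neg (fun hc => hi (congrArg Prod.fst hc).symm), if_neg hi]
        ring
    have hsum : ∀ i ∈ Finset.range nd,
        ∑ j ∈ Finset.range na, f i j * bLookup (((r0, s0), q) :: l) (i, j) =
        (∑ j ∈ Finset.range na, f i j * bLookup l (i, j)) +
          (if i = r0 then f r0 s0 * (q - bLookup l (r0, s0)) else 0) := by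
      intro i _
      rw [Finset.sum_congr rfl (fun j _ => hstep i j), Finset.sum_add_distrib]
      congr 1
      by_cases hi : i = r0
      · simp only [if_pos hi]
        rw [Finset.sum_ite_eq' (Finset.range na) s0
          (fun _ => f r0 s0 * (q - bLookup l (r0, s0))), if_pos (Finset.mem_range.mpr ht.2)]
      · simp only [if_neg hi]
        exact Finset.sum_const_zero
    rw [Finset.sum_congr rfl hsum, Finset.sum_add_distrib,
      Finset.sum_ite_eq' (Finset.range nd) r0 (fun _ => f r0 s0 * (q - bLookup l (r0, s0))),
      if_pos (Finset.mem_range.mpr ht.1),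
      ih (fun u hu => hrange u (List.mem_cons_of_mem _ hu)) hpw.of_cons,
      pv_bLookup_of_not_mem l (r0, s0) (fun u hu => Ne.symm (hhead u hu))]
    simp only [List.map_cons, List.sum_cons]
    ring

-- core: for ANY balanced triple, A's matrix+rescan equals B's recursion
theorem pv_core (d a : List Int) (c : List (List Int)) :
    (let sol0 := (List.range d.length).map (fun _ => (List.range a.length).map (fun _ => (0 : Int)))
     let sol := nwLoopA d a sol0 0 0
     ((sol, ((List.range d.length).flatMap (fun i =>
        (List.range a.length).map (fun j => (c.getD i []).getD j 0 * (sol.getD i []).getD j 0))).sum) : List (List Int) × Int)) =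
    nwRec d a c := by
  rw [pv_rec_eq]
  unfold pvGrid pvCost
  simp only
  rw [pv_loop_eq]
  set nd := d.length
  set na := a.length
  set path := nwPath d a 0 0 with hpath
  set Z := (List.range nd).map (fun _ => (List.range na).map (fun _ => (0 : Int))) with hZ
  have hbounds : ∀ t ∈ path, t.1.1 < nd ∧ t.1.2 < na := by
    intro t ht
    have := pv_path_bounds d a 0 0 t ht
    exact ⟨this.2.1, this.2.2.2⟩
  have hpw := pv_path_pairwise d a 0 0
  have hZlen : Z.length = nd := by simp [hZ]
  have hZrow : ∀ row ∈ Z, row.length = na := by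
    intro row hrow
    rcases List.mem_map.mp hrow with ⟨_, _, rfl⟩
    simp
  have hcell : ∀ r s : Nat, getCell (path.foldl pvWrite Z) r s = bLookup path (r, s) := by
    intro r s
    rw [pv_cell_foldl nd na path Z hZlen hZrow hbounds hpw r s]
    by_cases hmem : (r, s) ∈ path.map (·.1)
    · rw [if_pos hmem]
    · rw [if_neg hmem, pv_zero_cell]
      symm
      apply pv_bLookup_of_not_mem
      intro t ht hc
      exact hmem (List.mem_map.mpr ⟨t, ht, hc⟩)
  have hrowlen : ∀ row ∈ path.foldl pvWrite Z, row.length = na :=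
    pv_foldl_rows nd na path Z hZlen hZrow hbounds
  refine Prod.ext ?_ ?_
  · -- matrices agree
    apply List.ext_getElem
    · rw [pv_foldl_length, hZlen]; simp
    intro r h1 h2
    have h1' : r < (List.foldl pvWrite Z path).length := by simpa using h1
    have hr : r < nd := by
      have := h2
      simp only [List.length_map, List.length_range] at this
      simpa using this
    show (List.foldl pvWrite Z path)[r]'h1' =
      ((List.range nd).map (fun r => (List.range na).map (fun s => bLookup path (r, s))))[r]'(by simpa using h2)
    rw [List.getElem_map, List.getElem_range]
    apply List.ext_getElem
    · rw [hrowlen _ (List.getElem_mem _)]; simp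
    intro s hs1 hs2
    rw [List.getElem_map, List.getElem_range]
    have hrow_eq : (List.foldl pvWrite Z path).getD r [] = (List.foldl pvWrite Z path)[r]'h1' := by
      simp [List.getD, List.getElem?_eq_getElem h1']
    have hs' : s < ((List.foldl pvWrite Z path)[r]'h1').length := hs1
    rw [← hcell r s]
    unfold getCell
    rw [hrow_eq]
    simp [List.getD, List.getElem?_eq_getElem hs']
  · -- totals agree
    have hflat : ((List.range nd).flatMap (fun i =>
        (List.range na).map (fun j => (c.getD i []).getD j 0 * ((path.foldl pvWrite Z).getD i []).getD j 0))) =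
        ((List.range nd).map (fun i =>
        (List.range na).map (fun j => (c.getD i []).getD j 0 * getCell (path.foldl pvWrite Z) i j))).flatten := by
      rw [List.flatMap_def]
      rfl
    show ((List.range nd).flatMap (fun i =>
        (List.range na).map (fun j => (c.getD i []).getD j 0 * ((path.foldl pvWrite Z).getD i []).getD j 0))).sum =
      ((path.map (fun t => (c.getD t.1.1 []).getD t.1.2 0 * t.2)).sum)
    rw [hflat, List.sum_flatten, List.map_map]
    have hconv : ((List.range nd).map ((fun l => l.sum) ∘ fun i =>
        (List.range na).map (fun j => (c.getD i []).getD j 0 * getCell (path.foldl pvWrite Z) i j))).sum =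
        ∑ i ∈ Finset.range nd, ∑ j ∈ Finset.range na, (c.getD i []).getD j 0 * bLookup path (i, j) := by
      rw [pv_list_sum_finset]
      refine Finset.sum_congr rfl (fun i _ => ?_)
      simp only [Function.comp]
      rw [pv_list_sum_finset]
      exact Finset.sum_congr rfl (fun j _ => by rw [hcell i j])
    rw [hconv, pv_grid_sum nd na (fun i j => (c.getD i []).getD j 0) path hbounds hpw]

theorem pv_main : ∀ (derecha : List Int) (abajo : List Int) (costo : List (List Int)),
    esquina_noroeste derecha abajo costo = esquina_noroeste_alt derecha abajo costo := by
  intro derecha abajo costo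
  unfold esquina_noroeste esquina_noroeste_alt
  rcases lt_trichotomy derecha.sum abajo.sum with h | h | h
  · rw [if_pos (by omega), if_neg (by omega), if_neg (by omega), if_pos (by omega)]
    exact pv_core _ _ _
  · rw [if_neg (by omega), if_neg (by omega), if_neg (by omega)]
    exact pv_core _ _ _
  · rw [if_pos (by omega), if_pos (by omega), if_pos (by omega)]
    exact pv_core _ _ _

-- ===== VERDICT (by name: the statement is the Claim_ definition above) =====
theorem esquina_noroeste_spec : Claim_equal_esquina_noroeste := by
  intro d a c _ _
  unfold Spec_esquina_noroeste
  exact pv_main d a c
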